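-- pv_equiv track=rewrite | github.com/drandrewthomas/Remote-RTLPower-socket | remotepowerlib.py | __splitnumbersletters__
-- ===== SOURCE A (Python) =====
-- def __splitnumbersletters__(nlstr):
--     ns=""
--     ls=""
--     gotletter=False
--     tnlstr=nlstr.replace(",",".")
--     for c in tnlstr:
--         if gotletter==False:
--             if (not c.isdigit()) and c!=".":
--                 ls+=str(c)
--                 gotletter=True
--             else:
--                 ns+=str(c)
--         else:
--             ls+=str(c)
--     return [ns,ls]
-- ===== SOURCE B (Python) =====
-- def __splitnumbersletters__(nlstr):
--     tnlstr = nlstr.replace(",", ".")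
--     i = next((idx for idx, c in enumerate(tnlstr) if not c.isdigit() and c != '.'), len(tnlstr))
--     return [tnlstr[:i], tnlstr[i:]]
-- ===== Notes on version B (the rewrite author's own statement) =====
-- stated objective: simpler
-- what changed: Replaces A's stateful character-by-character loop with two growing string accumulators and a flag by finding the single split index (first non-digit, non-dot character) and slicing the string once, avoiding repeated string concatenation.
import Mathlib
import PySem

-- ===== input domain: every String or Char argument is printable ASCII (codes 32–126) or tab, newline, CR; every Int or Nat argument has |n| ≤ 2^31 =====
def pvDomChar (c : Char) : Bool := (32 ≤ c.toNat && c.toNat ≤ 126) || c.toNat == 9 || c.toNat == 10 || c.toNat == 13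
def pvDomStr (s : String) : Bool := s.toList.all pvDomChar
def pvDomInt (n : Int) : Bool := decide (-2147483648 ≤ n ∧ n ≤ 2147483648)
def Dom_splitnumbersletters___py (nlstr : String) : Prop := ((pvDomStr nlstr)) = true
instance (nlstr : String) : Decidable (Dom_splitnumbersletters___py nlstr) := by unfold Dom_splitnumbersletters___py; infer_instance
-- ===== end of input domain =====

-- B computes the split index of the first non-digit, non-dot character and slices once,
-- instead of A's stateful loop with two growing accumulators; objective: simpler.


-- ===== PORT A =====
-- the for-loop over tnlstr: state (ns, ls, gotletter), branches in A's order
def pvLoopA : List Char → List Char → List Char → Bool → List Char × List Char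
  | [], ns, ls, _ => (ns, ls)
  | c :: rest, ns, ls, gotletter =>
    if gotletter == false then
      if (!PySem.Chars.isdigit c) && c != '.' then
        pvLoopA rest ns (ls ++ [c]) true
      else
        pvLoopA rest (ns ++ [c]) ls gotletter
    else
      pvLoopA rest ns (ls ++ [c]) gotletter

def splitnumbersletters___py (nlstr : String) : List String :=
  let tnlstr := PySem.Str.replace nlstr "," "."
  let r := pvLoopA tnlstr.toList [] [] false
  [String.mk r.1, String.mk r.2]

-- ===== PORT B =====
-- Source B's 'next((idx for idx,c in enumerate(t) if not c.isdigit() and c != "."), len(t))'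
def pvSplitIdx : List Char → Nat
  | [] => 0
  | c :: rest => if (!PySem.Chars.isdigit c) && c != '.' then 0 else pvSplitIdx rest + 1

def splitnumbersletters___py_alt (nlstr : String) : List String :=
  let t := (PySem.Str.replace nlstr "," ".").toList
  let i := pvSplitIdx t
  -- tnlstr[:i] / tnlstr[i:] with 0 ≤ i ≤ len t: exactly List.take/drop
  [String.mk (t.take i), String.mk (t.drop i)]

-- ===== PRECONDITION & SPEC =====
def Spec_splitnumbersletters___py (nlstr : String) (out : List String) : Prop := out = splitnumbersletters___py_alt nlstr
instance (nlstr : String) (out : List String) : Decidable (Spec_splitnumbersletters___py nlstr out) := by unfold Spec_splitnumbersletters___py; infer_instance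

-- ===== CLAIM (what is proved, stated in full; the proofs are below) =====
def Claim_equal_splitnumbersletters___py : Prop := ∀ (nlstr : String), Dom_splitnumbersletters___py nlstr → Spec_splitnumbersletters___py nlstr (splitnumbersletters___py nlstr)

-- ===== LEMMAS AND PROOFS =====
lemma pvLoopA_true (l : List Char) : ∀ ns ls, pvLoopA l ns ls true = (ns, ls ++ l) := by
  induction l with
  | nil => simp [pvLoopA]
  | cons c rest ih => intro ns ls; simp [pvLoopA, ih]

lemma pvLoopA_false (l : List Char) : ∀ ns ls,
    pvLoopA l ns ls false = (ns ++ l.take (pvSplitIdx l), ls ++ l.drop (pvSplitIdx l)) := by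
  induction l with
  | nil => simp [pvLoopA, pvSplitIdx]
  | cons c rest ih =>
    intro ns ls
    by_cases h : ((!PySem.Chars.isdigit c) && c != '.') = true
    · simp [pvLoopA, pvSplitIdx, h, pvLoopA_true]
    · simp [pvLoopA, pvSplitIdx, h, ih]

-- ===== VERDICT (by name: the statement is the Claim_ definition above) =====
theorem splitnumbersletters___py_spec : Claim_equal_splitnumbersletters___py := by
  intro nlstr _
  unfold Spec_splitnumbersletters___py splitnumbersletters___py splitnumbersletters___py_alt
  simp [pvLoopA_false]
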